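-- pv_equiv track=rewrite | github.com/PropagationHouse/Substrate | src/tools/skill_learner.py | _summarize_phase_actions
-- ===== SOURCE A (Python) =====
-- from typing import Dict, Any, List, Optional
--
-- def _summarize_phase_actions(steps: List[Dict]) -> List[str]:
--     """Summarize what happened in a phase as human-readable actions."""
--     summaries = []
--     for step in steps:
--         action = step.get('action', '')
--         if action == 'click':
--             elem = step.get('element', '')
--             btn = step.get('button', 'left')
--             if elem:
--                 summaries.append(f"Clicked '{elem}'" + (f" ({btn})" if btn != 'left' else ''))
--             else:
--                 x, y = step.get('coords', [0, 0])
--                 summaries.append(f"Clicked at ({x}, {y})")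
--         elif action == 'type':
--             text = step.get('value', '')
--             preview = text[:50] + ('...' if len(text) > 50 else '')
--             summaries.append(f"Typed: \"{preview}\"")
--         elif action == 'keypress':
--             key = step.get('key', '')
--             summaries.append(f"Pressed {key}")
--         elif action == 'scroll':
--             direction = step.get('direction', 'down')
--             summaries.append(f"Scrolled {direction}")
--
--     # Collapse consecutive scrolls
--     collapsed = []
--     scroll_count = 0
--     for s in summaries:
--         if s.startswith('Scrolled'):
--             scroll_count += 1
--         else:
--             if scroll_count > 0:
--                 collapsed.append(f"Scrolled ({scroll_count}x)")
--                 scroll_count = 0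
--             collapsed.append(s)
--     if scroll_count > 0:
--         collapsed.append(f"Scrolled ({scroll_count}x)")
--
--     return collapsed
-- ===== SOURCE B (Python) =====
-- from typing import Dict, Any, List, Optional
--
--
-- def _format_step(step, action):
--     """Format one non-scroll step, or None if it produces no summary."""
--     if action == 'click':
--         elem = step.get('element', '')
--         if elem:
--             btn = step.get('button', 'left')
--             suffix = '' if btn == 'left' else f" ({btn})"
--             return f"Clicked '{elem}'{suffix}"
--         x, y = step.get('coords', [0, 0])
--         return f"Clicked at ({x}, {y})"
--     if action == 'type':
--         text = step.get('value', '')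
--         if len(text) > 50:
--             return f'Typed: "{text[:50]}..."'
--         return f'Typed: "{text}"'
--     if action == 'keypress':
--         return f"Pressed {step.get('key', '')}"
--     return None
--
--
-- def _summarize_phase_actions(steps: List[Dict]) -> List[str]:
--     """Summarize what happened in a phase as human-readable actions (single pass)."""
--     collapsed = []
--     scroll_count = 0
--     for step in steps:
--         action = step.get('action', '')
--         if action == 'scroll':
--             scroll_count += 1
--             continue
--         s = _format_step(step, action)
--         if s is None:
--             continue
--         if scroll_count > 0:
--             collapsed.append(f"Scrolled ({scroll_count}x)")
--             scroll_count = 0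
--         collapsed.append(s)
--     if scroll_count > 0:
--         collapsed.append(f"Scrolled ({scroll_count}x)")
--     return collapsed
-- ===== Notes on version B (the rewrite author's own statement) =====
-- stated objective: simpler
-- what changed: Replaces A's two sequential passes (build a summaries list, then re-scan it collapsing strings that startswith 'Scrolled') with one fused pass over the steps that keys the collapse directly off action == 'scroll' and a running scroll_count, dropping the intermediate list and the string-prefix test entirely.
import Mathlib
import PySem

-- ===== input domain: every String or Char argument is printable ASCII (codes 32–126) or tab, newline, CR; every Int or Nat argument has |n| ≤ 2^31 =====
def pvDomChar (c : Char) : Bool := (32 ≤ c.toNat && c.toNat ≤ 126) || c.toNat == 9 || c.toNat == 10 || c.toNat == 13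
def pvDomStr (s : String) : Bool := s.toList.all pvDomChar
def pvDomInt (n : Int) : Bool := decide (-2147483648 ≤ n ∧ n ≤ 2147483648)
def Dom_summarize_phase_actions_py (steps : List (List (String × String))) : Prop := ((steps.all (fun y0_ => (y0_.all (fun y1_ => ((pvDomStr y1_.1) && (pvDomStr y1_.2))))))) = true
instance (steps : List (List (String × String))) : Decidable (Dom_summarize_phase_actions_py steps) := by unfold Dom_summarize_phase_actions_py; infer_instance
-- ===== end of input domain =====

-- B fuses A's two passes (format every step into a summaries list, then re-scan it collapsing
-- consecutive 'Scrolled…' strings) into one loop keyed on action == 'scroll'; return value only, no mutation.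

-- ===== PORT A =====
-- one iteration of A's first loop: append this step's summary (if any) to `summaries`
def aStepSummaries (summaries : List (String)) (step : List (String × String)) : List String :=
  let d := PySem.Dict.ofList step
  let action := d.getD "action" ""
  if action = "click" then
    let elem := d.getD "element" ""
    let btn := d.getD "button" "left"
    if elem ≠ "" then
      summaries ++ ["Clicked '" ++ elem ++ "'" ++ (if btn ≠ "left" then " (" ++ btn ++ ")" else "")]
    else
      match d.get? "coords" with
      | none => summaries ++ ["Clicked at (0, 0)"]  -- x, y = [0, 0]
      | some cs =>
        match cs.toList with
        | [x, y] => summaries ++ ["Clicked at (" ++ String.ofList [x] ++ ", " ++ String.ofList [y] ++ ")"]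
        | _ => summaries  -- Python raises ValueError (unpacking) here; excluded by Pre_
  else if action = "type" then
    let text := d.getD "value" ""
    let preview := PySem.Str.slice text none (some 50) ++ (if 50 < PySem.Str.len text then "..." else "")
    summaries ++ ["Typed: \"" ++ preview ++ "\""]
  else if action = "keypress" then
    summaries ++ ["Pressed " ++ d.getD "key" ""]
  else if action = "scroll" then
    summaries ++ ["Scrolled " ++ d.getD "direction" "down"]
  else summaries

-- one iteration of A's second loop (state = (collapsed, scroll_count))
def aCollapse (st : List String × Int) (s : String) : List String × Int :=
  if PySem.Str.startswith s "Scrolled" then (st.1, st.2 + 1)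
  else if st.2 > 0 then (st.1 ++ ["Scrolled (" ++ PySem.Int.toStr st.2 ++ "x)"] ++ [s], 0)
  else (st.1 ++ [s], 0)

def summarize_phase_actions_py (steps : List (List (String × String))) : List String :=
  let summaries := steps.foldl aStepSummaries []
  let st := summaries.foldl aCollapse ([], 0)
  if st.2 > 0 then st.1 ++ ["Scrolled (" ++ PySem.Int.toStr st.2 ++ "x)"] else st.1

-- ===== PORT B =====
-- B's helper _format_step: the summary of one non-scroll step, none if it produces no summary
def bFormatStep (d : PySem.Dict String String) (action : String) : Option String :=
  if action = "click" then
    let elem := d.getD "element" ""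
    if elem ≠ "" then
      let btn := d.getD "button" "left"
      let suffix := if btn = "left" then "" else " (" ++ btn ++ ")"
      some ("Clicked '" ++ elem ++ "'" ++ suffix)
    else
      match d.get? "coords" with
      | none => some "Clicked at (0, 0)"
      | some cs =>
        match cs.toList with
        | [x, y] => some ("Clicked at (" ++ String.ofList [x] ++ ", " ++ String.ofList [y] ++ ")")
        | _ => none  -- Python raises ValueError (unpacking) here; excluded by Pre_
  else if action = "type" then
    let text := d.getD "value" ""
    if 50 < PySem.Str.len text then some ("Typed: \"" ++ PySem.Str.slice text none (some 50) ++ "...\"")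
    else some ("Typed: \"" ++ text ++ "\"")
  else if action = "keypress" then
    some ("Pressed " ++ d.getD "key" "")
  else none

-- B's single fused loop (state = (collapsed, scroll_count))
def bLoop (st : List String × Int) (step : List (String × String)) : List String × Int :=
  let d := PySem.Dict.ofList step
  let action := d.getD "action" ""
  if action = "scroll" then (st.1, st.2 + 1)
  else
    match bFormatStep d action with
    | none => st
    | some s =>
      if st.2 > 0 then (st.1 ++ ["Scrolled (" ++ PySem.Int.toStr st.2 ++ "x)", s], 0)
      else (st.1 ++ [s], 0)

def summarize_phase_actions_py_alt (steps : List (List (String × String))) : List String :=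
  let st := steps.foldl bLoop ([], 0)
  if st.2 > 0 then st.1 ++ ["Scrolled (" ++ PySem.Int.toStr st.2 ++ "x)"] else st.1

-- ===== PRECONDITION & SPEC =====
-- Pre_ excludes exactly the inputs where Python A raises ValueError: a 'click' step with no/empty
-- 'element' whose 'coords' entry is a string not of length 2 (the x, y = coords unpack fails; B raises there too).
def Pre_summarize_phase_actions_py (steps : List (List (String × String))) : Prop :=
  steps.all (fun step =>
    let d := PySem.Dict.ofList step
    !(d.getD "action" "" == "click" && d.getD "element" "" == "" &&
      ((d.get? "coords").map (fun cs => cs.toList.length != 2)).getD false)) = true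
instance (steps : List (List (String × String))) : Decidable (Pre_summarize_phase_actions_py steps) := by
  unfold Pre_summarize_phase_actions_py; infer_instance

def pvWitness_summarize_phase_actions_py : (List (List (String × String))) :=
  [[("action", "scroll")], [("action", "scroll")], [("action", "click"), ("element", "OK")], [("action", "type"), ("value", "hi")]]

def Spec_summarize_phase_actions_py (steps : List (List (String × String))) (out : List String) : Prop := out = summarize_phase_actions_py_alt steps
instance (steps : List (List (String × String))) (out : List String) : Decidable (Spec_summarize_phase_actions_py steps out) := by unfold Spec_summarize_phase_actions_py; infer_instance

-- ===== CLAIM (what is proved, stated in full; the proofs are below) =====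
def Claim_equal_summarize_phase_actions_py : Prop := ∀ (steps : List (List (String × String))), Dom_summarize_phase_actions_py steps → Pre_summarize_phase_actions_py steps → Spec_summarize_phase_actions_py steps (summarize_phase_actions_py steps)

-- ===== LEMMAS AND PROOFS =====

-- the summaries A's first loop contributes for one step
def itemsOf (step : List (String × String)) : List String := aStepSummaries [] step

theorem aStepSummaries_eq_append (summaries : List String) (step : List (String × String)) :
    aStepSummaries summaries step = summaries ++ itemsOf step := by
  simp only [itemsOf, aStepSummaries]
  split_ifs <;> (try split) <;> (try split) <;> simp

theorem foldl_aStepSummaries (steps : List (List (String × String))) (acc : List String) :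
    steps.foldl aStepSummaries acc = acc ++ steps.flatMap itemsOf := by
  induction steps generalizing acc with
  | nil => simp
  | cons s rest ih => simp [aStepSummaries_eq_append, ih]

theorem chars_scrolled (cs : List Char) :
    PySem.Chars.startswith ('S'::'c'::'r'::'o'::'l'::'l'::'e'::'d'::' '::cs)
      ['S','c','r','o','l','l','e','d'] = true := by
  simp [PySem.Chars.startswith, List.isPrefixOf]

theorem chars_not_scrolled (c : Char) (cs : List Char) (h : c ≠ 'S') :
    PySem.Chars.startswith (c :: cs) ['S','c','r','o','l','l','e','d'] = false := by
  simp [PySem.Chars.startswith, List.isPrefixOf]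
  exact fun hS => absurd hS.symm h

theorem slice_of_short (s : String) (h : ¬ 50 < s.length) :
    PySem.Str.slice s none (some 50) = s := by
  unfold PySem.Str.slice
  have hl : s.toList.length ≤ (50:Int).toNat := by
    simp only [String.length_toList] at *
    omega
  rw [PySem.Chars.slice_eq_listSlice, PySem.List.slice_to s.toList ((by omega : (0:Int) ≤ 50)),
      List.take_of_length_le hl]
  exact String.ofList_toList

theorem dots_quote : ("..." : String) ++ "\"" = "...\"" := by decide

-- the key fusion lemma: folding A's collapse over one step's summaries is one B iteration
theorem step_fuse (st : List String × Int) (step : List (String × String)) :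
    (itemsOf step).foldl aCollapse st = bLoop st step := by
  simp only [itemsOf, aStepSummaries, bLoop, bFormatStep]
  by_cases h1 : (PySem.Dict.ofList step).getD "action" "" = "click"
  · by_cases h2 : (PySem.Dict.ofList step).getD "element" "" = ""
    · cases hc : (PySem.Dict.ofList step).get? "coords" with
      | none => simp [h1, h2, aCollapse, chars_not_scrolled]
      | some cs =>
        rcases hx : cs.toList with _ | ⟨x, _ | ⟨y, _ | ⟨z, rest⟩⟩⟩ <;>
          simp [h1, h2, hx, aCollapse, chars_not_scrolled]
    · simp [h1, h2, aCollapse, chars_not_scrolled]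
  · by_cases h2 : (PySem.Dict.ofList step).getD "action" "" = "type"
    · by_cases h3 : 50 < ((PySem.Dict.ofList step).getD "value" "").length
      · simp [h2, h3, aCollapse, chars_not_scrolled, String.append_assoc, dots_quote]
      · simp [h2, h3, aCollapse, chars_not_scrolled,
              slice_of_short ((PySem.Dict.ofList step).getD "value" "") h3]
    · by_cases h3 : (PySem.Dict.ofList step).getD "action" "" = "keypress"
      · simp [h3, aCollapse, chars_not_scrolled]
      · by_cases h4 : (PySem.Dict.ofList step).getD "action" "" = "scroll"
        · simp [h4, aCollapse, chars_scrolled]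
        · simp [h1, h2, h3, h4]

theorem fuse (steps : List (List (String × String))) (st : List String × Int) :
    (steps.flatMap itemsOf).foldl aCollapse st = steps.foldl bLoop st := by
  induction steps generalizing st with
  | nil => rfl
  | cons s rest ih => simp only [List.flatMap_cons, List.foldl_append, List.foldl_cons, step_fuse, ih]

-- ===== VERDICT (by name: the statement is the Claim_ definition above) =====
theorem summarize_phase_actions_py_spec : Claim_equal_summarize_phase_actions_py := by
  intro steps _ _
  unfold Spec_summarize_phase_actions_py summarize_phase_actions_py summarize_phase_actions_py_alt
  simp only [foldl_aStepSummaries, List.nil_append, fuse]
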